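-- pv_equiv track=rewrite | github.com/gautam132002/invoice-pdf-data-extraction | qnot.py | create_sublists
-- ===== SOURCE A (Python) =====
-- def create_sublists(strings):
--     sublists = []
--     sublist = []
--     style_indices = [i for i, string in enumerate(strings) if string.startswith("style")]
--
--     for i, string in enumerate(strings):
--         if i in style_indices:
--             if sublist:
--                 sublists.append(sublist)
--             sublist = [strings[i-1]]
--         sublist.append(string)
--
--     if sublist:
--         sublists.append(sublist)
--
--     return sublists
-- ===== SOURCE B (Python) =====
-- def create_sublists(strings):
--     # boundary-index decomposition: find the style positions once, then build
--     # each group by slicing between consecutive boundaries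
--     strings = list(strings)
--     n = len(strings)
--     idx = [i for i, s in enumerate(strings) if s.startswith("style")]
--     if not idx:
--         return [strings] if strings else []
--     groups = []
--     if idx[0] > 0:
--         groups.append(strings[:idx[0]])
--     bounds = idx + [n]
--     for k in range(len(idx)):
--         groups.append([strings[idx[k] - 1]] + strings[idx[k]:bounds[k + 1]])
--     return groups
-- ===== Notes on version B (the rewrite author's own statement) =====
-- stated objective: alternative
-- what changed: B computes the 'style' boundary indices once and builds each group by slicing strings between consecutive boundaries (plus the strings[idx-1] prepend), instead of A's element-by-element pass that accumulates a current sublist, flushes it at each style element, and tests membership of every index in the style-index list.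
import Mathlib
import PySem

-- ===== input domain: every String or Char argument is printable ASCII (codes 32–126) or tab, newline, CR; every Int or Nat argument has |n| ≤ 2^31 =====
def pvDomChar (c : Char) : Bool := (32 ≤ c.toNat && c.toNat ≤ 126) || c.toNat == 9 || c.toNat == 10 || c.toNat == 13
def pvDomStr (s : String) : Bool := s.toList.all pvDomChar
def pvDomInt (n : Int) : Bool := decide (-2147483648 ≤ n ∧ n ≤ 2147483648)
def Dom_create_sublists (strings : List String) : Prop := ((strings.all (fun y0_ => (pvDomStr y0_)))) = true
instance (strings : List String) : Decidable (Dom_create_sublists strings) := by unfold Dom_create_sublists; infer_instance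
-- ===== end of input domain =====

-- B replaces A's element-by-element accumulating pass by a boundary-index decomposition:
-- the "style" positions are computed once and each group is a slice between consecutive
-- boundaries (keeping Python's strings[idx-1] prepend). Objective: alternative decomposition.

-- ===== PORT A =====
-- style_indices = [i for i, string in enumerate(strings) if string.startswith("style")]
def pvStyleIndicesA (strings : List String) : List Int :=
  ((PySem.List.enumerate strings 0).filter (fun p => PySem.Str.startswith p.2 "style")).map (fun p => p.1)

-- one iteration of A's for-loop over (i, string); state = (sublists, sublist)
def pvStepA (strings : List String) (st : List (List String) × List String) (p : Int × String) :
    List (List String) × List String :=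
  if p.1 ∈ pvStyleIndicesA strings then
    ((if st.2 ≠ [] then st.1 ++ [st.2] else st.1),
     [PySem.List.pyGetD strings (p.1 - 1) ""] ++ [p.2])    -- sublist = [strings[i-1]]; sublist.append(string)
  else (st.1, st.2 ++ [p.2])

-- final "if sublist: sublists.append(sublist)"
def pvFinishA (st : List (List String) × List String) : List (List String) :=
  if st.2 ≠ [] then st.1 ++ [st.2] else st.1

def create_sublists (strings : List String) : List (List String) :=
  pvFinishA ((PySem.List.enumerate strings 0).foldl (pvStepA strings) ([], []))

-- ===== PORT B =====
-- idx = [i for i, s in enumerate(strings) if s.startswith("style")]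
def pvIdxB (strings : List String) : List Int :=
  ((PySem.List.enumerate strings 0).filter (fun p => PySem.Str.startswith p.2 "style")).map (fun p => p.1)

def create_sublists_alt (strings : List String) : List (List String) :=
  let n : Int := PySem.List.len strings
  let idx := pvIdxB strings
  if idx = [] then (if strings ≠ [] then [strings] else [])
  else
    let groups : List (List String) :=
      if 0 < PySem.List.pyGetD idx 0 0 then [PySem.List.slice strings none (some (PySem.List.pyGetD idx 0 0))]
      else []
    let bounds := idx ++ [n]
    (PySem.List.pyRange 0 (PySem.List.len idx) 1).foldl
      (fun gs k =>
        gs ++ [[PySem.List.pyGetD strings (PySem.List.pyGetD idx k 0 - 1) ""] ++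
               PySem.List.slice strings (some (PySem.List.pyGetD idx k 0))
                                        (some (PySem.List.pyGetD bounds (k + 1) 0))])
      groups

-- ===== PRECONDITION & SPEC =====
def Spec_create_sublists (strings : List String) (out : List (List String)) : Prop := out = create_sublists_alt strings
instance (strings : List String) (out : List (List String)) : Decidable (Spec_create_sublists strings out) := by unfold Spec_create_sublists; infer_instance

-- ===== CLAIM (what is proved, stated in full; the proofs are below) =====
def Claim_equal_create_sublists : Prop := ∀ (strings : List String), Dom_create_sublists strings → Spec_create_sublists strings (create_sublists strings)

-- ===== LEMMAS AND PROOFS =====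

-- does strings[j] (Nat index, getD) start with "style"?
def pvPB (strings : List String) (j : Nat) : Bool := PySem.Str.startswith (strings.getD j "") "style"

-- the style positions as natural numbers
def pvIdxN (strings : List String) : List Nat := (List.range strings.length).filter (pvPB strings)

-- strings[j-1] with Python semantics (j = 0 wraps to the last element)
def pvPrev (strings : List String) (j : Nat) : String := PySem.List.pyGetD strings ((j : Int) - 1) ""

-- strings[a:b] for Nat bounds
def pvSliceN (strings : List String) (a b : Nat) : List String := (strings.drop a).take (b - a)

-- next group boundary: first entry of l, or len(strings)
def pvBound (l : List Nat) (n : Nat) : Nat := l.headD n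

-- the groups generated from the style positions l
def pvChunks (strings : List String) : List Nat → List (List String)
  | [] => []
  | s :: rest => (pvPrev strings s :: pvSliceN strings s (pvBound rest strings.length)) :: pvChunks strings rest

-- the common normal form both ports are reduced to
def pvCommon (strings : List String) : List (List String) :=
  (if pvSliceN strings 0 (pvBound (pvIdxN strings) strings.length) ≠ []
   then [pvSliceN strings 0 (pvBound (pvIdxN strings) strings.length)] else []) ++
  pvChunks strings (pvIdxN strings)

lemma pv_enum_filter' (xs : List String) (q : String → Bool) :
    ∀ s : Int, (((PySem.List.enumerate xs s).filter (fun p => q p.2)).map (fun p => p.1))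
      = ((List.range xs.length).filter (fun j => q (xs.getD j ""))).map (fun (j : Nat) => s + (j : Int)) := by
  induction xs with
  | nil => intro s; simp [PySem.List.enumerate_nil]
  | cons x xs ih =>
    intro s
    rw [PySem.List.enumerate_cons]
    simp only [List.length_cons, List.range_succ_eq_map, List.filter_cons, List.filter_map]
    have hmap : ∀ l : List Nat, (l.map Nat.succ).map (fun (j : Nat) => s + (j : Int))
        = l.map (fun (j : Nat) => (s + 1) + (j : Int)) := by
      intro l; rw [List.map_map]; apply List.map_congr_left; intro j _; simp; ring
    by_cases hq : q x = true <;>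
      simp only [List.getD_cons_zero, List.getD_cons_succ, Function.comp_def, hq, if_true,
        if_false, Bool.false_eq_true, List.map_cons] <;>
      rw [hmap, ← ih (s+1)]
    simp

lemma pv_idxA_eq (strings : List String) :
    pvStyleIndicesA strings = (pvIdxN strings).map (fun (j : Nat) => (j : Int)) := by
  have h := pv_enum_filter' strings (fun t => PySem.Str.startswith t "style") 0
  simp only [zero_add] at h
  unfold pvStyleIndicesA pvIdxN
  exact h

lemma pv_idxB_eq (strings : List String) :
    pvIdxB strings = (pvIdxN strings).map (fun (j : Nat) => (j : Int)) := by
  have h := pv_enum_filter' strings (fun t => PySem.Str.startswith t "style") 0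
  simp only [zero_add] at h
  unfold pvIdxB pvIdxN
  exact h

lemma pv_mem_style (strings : List String) (j : Nat) :
    ((j : Int) ∈ pvStyleIndicesA strings) ↔ (j ∈ pvIdxN strings) := by
  rw [pv_idxA_eq]
  simp

lemma pv_mem_idxN (strings : List String) (j : Nat) :
    j ∈ pvIdxN strings ↔ j < strings.length ∧ pvPB strings j = true := by
  simp [pvIdxN, List.mem_filter]

lemma pv_sliceN_cons (strings : List String) (a b : Nat) (ha : a < strings.length) (hab : a < b) :
    pvSliceN strings a b = strings.getD a "" :: pvSliceN strings (a + 1) b := by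
  unfold pvSliceN
  rw [List.drop_eq_getElem_cons ha]
  have : b - a = (b - (a + 1)) + 1 := by omega
  rw [this, List.take_succ_cons, List.getD_eq_getElem _ _ ha]

lemma pv_sliceN_len (strings : List String) (s : Nat) :
    pvSliceN strings s strings.length = strings.drop s := by
  unfold pvSliceN
  exact List.take_of_length_le (by simp)

lemma pv_sliceN_length (strings : List String) (a b : Nat) (hb : b ≤ strings.length) :
    (pvSliceN strings a b).length = b - a := by
  simp [pvSliceN]; omega

lemma pv_drop_split (strings : List String) (a b : Nat) (hab : a ≤ b) :
    strings.drop a = pvSliceN strings a b ++ strings.drop b := by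
  unfold pvSliceN
  have h : strings.drop b = (strings.drop a).drop (b - a) := by
    rw [List.drop_drop]; congr 1; omega
  rw [h, List.take_append_drop]

lemma pv_finishA_eq (st : List (List String) × List String) :
    pvFinishA st = st.1 ++ (if st.2 ≠ [] then [st.2] else []) := by
  unfold pvFinishA; split <;> simp

-- A's loop over a style-free index segment just appends the elements
lemma pv_loop_nostyle (strings : List String) :
    ∀ (d s : Nat) (acc : List (List String)) (cur : List String),
      (∀ j, s ≤ j → j < s + d → pvPB strings j = false) →
      (PySem.List.enumerate (pvSliceN strings s (s + d)) (s : Int)).foldl (pvStepA strings) (acc, cur)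
        = (acc, cur ++ pvSliceN strings s (s + d)) := by
  intro d
  induction d with
  | zero => intro s acc cur _; simp [pvSliceN, PySem.List.enumerate_nil]
  | succ d ih =>
    intro s acc cur hns
    by_cases hsl : s < strings.length
    · rw [pv_sliceN_cons strings s (s + (d+1)) hsl (by omega)]
      rw [PySem.List.enumerate_cons, List.foldl_cons]
      have hstep : pvStepA strings (acc, cur) ((s : Int), strings.getD s "") = (acc, cur ++ [strings.getD s ""]) := by
        unfold pvStepA
        have : ¬ ((s : Int) ∈ pvStyleIndicesA strings) := by
          rw [pv_mem_style, pv_mem_idxN]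
          intro ⟨_, hp⟩
          rw [hns s (le_refl s) (by omega)] at hp
          exact Bool.false_ne_true hp
        simp [this]
      rw [hstep]
      have hs1 : ((s : Int) + 1) = ((s + 1 : Nat) : Int) := by push_cast; ring
      have heq : pvSliceN strings (s+1) (s + (d+1)) = pvSliceN strings (s+1) ((s+1) + d) := by
        congr 1; omega
      rw [hs1, heq, ih (s+1) acc (cur ++ [strings.getD s ""])
        (fun j h1 h2 => hns j (by omega) (by omega))]
      simp
    · have : pvSliceN strings s (s + (d+1)) = [] := by
        unfold pvSliceN
        rw [List.drop_eq_nil_of_le (by omega)]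
        simp
      rw [this]
      simp [PySem.List.enumerate_nil]

lemma pv_loop_nostyle' (strings : List String) (s e : Nat) (acc : List (List String))
    (cur : List String) (hse : s ≤ e)
    (hns : ∀ j, s ≤ j → j < e → pvPB strings j = false) :
    (PySem.List.enumerate (pvSliceN strings s e) (s : Int)).foldl (pvStepA strings) (acc, cur)
      = (acc, cur ++ pvSliceN strings s e) := by
  obtain ⟨d, rfl⟩ : ∃ d, e = s + d := ⟨e - s, by omega⟩
  exact pv_loop_nostyle strings d s acc cur hns

-- main characterisation of A's loop + final flush, from position s with style list l
lemma pv_loop_main (strings : List String) :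
    ∀ (l : List Nat) (s : Nat) (acc : List (List String)) (cur : List String),
      (∀ j, j ∈ l ↔ s ≤ j ∧ j < strings.length ∧ pvPB strings j = true) →
      l.Pairwise (· < ·) →
      pvFinishA ((PySem.List.enumerate (strings.drop s) (s : Int)).foldl (pvStepA strings) (acc, cur))
        = acc ++ (if cur ++ pvSliceN strings s (pvBound l strings.length) ≠ []
                  then [cur ++ pvSliceN strings s (pvBound l strings.length)] else [])
              ++ pvChunks strings l := by
  intro l
  induction l with
  | nil =>
    intro s acc cur hchar _
    have hns : ∀ j, s ≤ j → j < strings.length → pvPB strings j = false := by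
      intro j h1 h2
      by_contra h
      have : j ∈ ([] : List Nat) := (hchar j).2 ⟨h1, h2, by simpa using h⟩
      simp at this
    simp only [pvBound, List.headD_nil, pvChunks]
    by_cases hs : s ≤ strings.length
    · rw [← pv_sliceN_len strings s,
        pv_loop_nostyle' strings s strings.length acc cur hs hns, pv_finishA_eq]
      simp
    · have h1 : strings.drop s = [] := List.drop_eq_nil_of_le (by omega)
      have h2 : pvSliceN strings s strings.length = [] := by
        unfold pvSliceN; rw [h1]; simp
      rw [h1, h2, pv_finishA_eq]
      simp [PySem.List.enumerate_nil]
  | cons s0 rest ih =>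
    intro s acc cur hchar hpw
    obtain ⟨hss0, hs0n, hP0⟩ := (hchar s0).1 List.mem_cons_self
    have hsplit : strings.drop s = pvSliceN strings s s0 ++ strings.drop s0 :=
      pv_drop_split strings s s0 hss0
    have hdrop0 : strings.drop s0 = strings.getD s0 "" :: strings.drop (s0+1) := by
      rw [List.drop_eq_getElem_cons hs0n, List.getD_eq_getElem _ _ hs0n]
    rw [hsplit, hdrop0, PySem.List.enumerate_append, List.foldl_append]
    have hns : ∀ j, s ≤ j → j < s0 → pvPB strings j = false := by
      intro j h1 h2
      by_contra h
      have hj : j ∈ s0 :: rest := (hchar j).2 ⟨h1, by omega, by simpa using h⟩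
      rcases List.mem_cons.1 hj with rfl | hj'
      · omega
      · have := (List.pairwise_cons.1 hpw).1 j hj'; omega
    rw [pv_loop_nostyle' strings s s0 acc cur hss0 hns]
    have hlen : ((s:Int) + ((pvSliceN strings s s0).length : Int)) = (s0 : Int) := by
      rw [pv_sliceN_length strings s s0 (by omega)]; omega
    rw [hlen, PySem.List.enumerate_cons, List.foldl_cons]
    have hstep : pvStepA strings (acc, cur ++ pvSliceN strings s s0) ((s0:Int), strings.getD s0 "")
        = (pvFinishA (acc, cur ++ pvSliceN strings s s0), [pvPrev strings s0, strings.getD s0 ""]) := by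
      unfold pvStepA pvFinishA pvPrev
      have hm : (s0:Int) ∈ pvStyleIndicesA strings :=
        (pv_mem_style strings s0).2 ((pv_mem_idxN strings s0).2 ⟨hs0n, hP0⟩)
      simp [hm]
    rw [hstep]
    have hs01 : ((s0:Int) + 1) = ((s0+1 : Nat) : Int) := by push_cast; ring
    rw [hs01]
    have hchar' : ∀ j, j ∈ rest ↔ s0+1 ≤ j ∧ j < strings.length ∧ pvPB strings j = true := by
      intro j
      constructor
      · intro hj
        obtain ⟨h1, h2, h3⟩ := (hchar j).1 (List.mem_cons_of_mem _ hj)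
        have := (List.pairwise_cons.1 hpw).1 j hj
        exact ⟨by omega, h2, h3⟩
      · intro ⟨h1, h2, h3⟩
        rcases List.mem_cons.1 ((hchar j).2 ⟨by omega, h2, h3⟩) with rfl | hj'
        · omega
        · exact hj'
    rw [ih (s0+1) (pvFinishA (acc, cur ++ pvSliceN strings s s0))
      [pvPrev strings s0, strings.getD s0 ""] hchar' (List.pairwise_cons.1 hpw).2]
    have hb : s0 < pvBound rest strings.length := by
      cases rest with
      | nil => simpa [pvBound] using hs0n
      | cons r t =>
        have := (List.pairwise_cons.1 hpw).1 r List.mem_cons_self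
        simpa [pvBound]
    have hslice : strings.getD s0 "" :: pvSliceN strings (s0+1) (pvBound rest strings.length)
        = pvSliceN strings s0 (pvBound rest strings.length) :=
      (pv_sliceN_cons strings s0 _ hs0n hb).symm
    rw [pv_finishA_eq (acc, cur ++ pvSliceN strings s s0)]
    have hcons : ([pvPrev strings s0, strings.getD s0 ""] : List String)
          ++ pvSliceN strings (s0+1) (pvBound rest strings.length)
        = pvPrev strings s0 :: pvSliceN strings s0 (pvBound rest strings.length) := by
      rw [← hslice]; simp
    rw [if_pos (show ([pvPrev strings s0, strings.getD s0 ""]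
        ++ pvSliceN strings (s0+1) (pvBound rest strings.length)) ≠ [] by simp), hcons]
    simp only [pvChunks, pvBound, List.headD_cons]
    simp [List.append_assoc]

lemma pv_A_eq_common (strings : List String) : create_sublists strings = pvCommon strings := by
  unfold create_sublists pvCommon
  have hpw : (pvIdxN strings).Pairwise (· < ·) :=
    List.Pairwise.sublist List.filter_sublist List.pairwise_lt_range
  have hchar : ∀ j, j ∈ pvIdxN strings ↔ 0 ≤ j ∧ j < strings.length ∧ pvPB strings j = true := by
    intro j
    rw [pv_mem_idxN]
    constructor
    · rintro ⟨h1, h2⟩; exact ⟨Nat.zero_le _, h1, h2⟩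
    · rintro ⟨_, h1, h2⟩; exact ⟨h1, h2⟩
  have h := pv_loop_main strings (pvIdxN strings) 0 [] [] hchar hpw
  simpa only [List.drop_zero, Nat.cast_zero, List.nil_append] using h

lemma pv_getD_map_cast (l : List Nat) (k : Nat) (hk : k < l.length) :
    (l.map (fun (j : Nat) => (j : Int))).getD k 0 = ((l.getD k 0 : Nat) : Int) := by
  rw [List.getD_eq_getElem _ _ (by simpa using hk), List.getD_eq_getElem _ _ hk]
  simp

lemma pv_mapchunk (strings : List String) :
    ∀ (l : List Nat),
      (List.range l.length).map (fun k =>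
        pvPrev strings (l.getD k 0) ::
          pvSliceN strings (l.getD k 0) ((l ++ [strings.length]).getD (k + 1) 0))
        = pvChunks strings l := by
  intro l
  induction l with
  | nil => simp [pvChunks]
  | cons a t ih =>
    simp only [List.length_cons, List.range_succ_eq_map, List.map_cons, List.map_map]
    show _ :: _ = (pvPrev strings a :: pvSliceN strings a (pvBound t strings.length)) :: pvChunks strings t
    rw [List.cons_eq_cons]
    constructor
    · cases t <;> simp [pvBound]
    · rw [← ih]
      apply List.map_congr_left
      intro k _
      simp [List.cons_append]

lemma pv_B_eq_common (strings : List String) : create_sublists_alt strings = pvCommon strings := by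
  cases hidx : pvIdxN strings with
  | nil =>
    simp only [create_sublists_alt, pv_idxB_eq, hidx, List.map_nil, if_true, pvCommon,
      pvChunks, pvBound, List.headD_nil]
    have : pvSliceN strings 0 strings.length = strings := by
      rw [pv_sliceN_len]; simp
    rw [this]
    split <;> simp_all
  | cons i0 t =>
    have hi0 : i0 < strings.length := by
      have : i0 ∈ pvIdxN strings := by rw [hidx]; exact List.mem_cons_self
      exact ((pv_mem_idxN strings i0).1 this).1
    simp only [create_sublists_alt, pv_idxB_eq, hidx, List.map_cons]
    rw [if_neg (by simp)]
    rw [PySem.List.foldl_append_singleton_eq_map]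
    simp only [PySem.List.len_eq, List.length_cons, List.length_map]
    have hrange : PySem.List.pyRange 0 ((t.length + 1 : Nat) : Int) 1
        = (List.range (t.length + 1)).map (fun (k : Nat) => (k : Int)) :=
      PySem.List.pyRange_zero_nat (t.length + 1)
    rw [hrange, List.map_map]
    unfold pvCommon
    rw [hidx]
    simp only [pvBound, List.headD_cons]
    congr 1
    · -- the leading (pre-first-style) group
      have hget0 : PySem.List.pyGetD ((i0 : Int) :: t.map (fun (j : Nat) => (j : Int))) 0 0 = (i0 : Int) :=
        PySem.List.pyGetD_zero_cons _ _ _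
      rw [hget0, PySem.List.slice_to_natCast]
      have htake : pvSliceN strings 0 i0 = strings.take i0 := by
        unfold pvSliceN; simp
      rw [htake]
      by_cases h0 : 0 < i0
      · have hne : strings.take i0 ≠ [] := by
          intro h
          rw [List.take_eq_nil_iff] at h
          rcases h with h | h
          · omega
          · rw [h] at hi0; simp at hi0
        rw [if_pos (by exact_mod_cast h0), if_pos hne]
      · have hz : i0 = 0 := by omega
        subst hz
        rw [if_neg (by exact_mod_cast h0), if_neg]
        simp
    · -- the per-style-index groups
      rw [← pv_mapchunk strings (i0 :: t)]
      simp only [List.length_cons]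
      apply List.map_congr_left
      intro k hk
      have hk' : k < t.length + 1 := List.mem_range.1 hk
      simp only [Function.comp_apply]
      rw [show ((i0 : Int) :: t.map (fun (j : Nat) => (j : Int)))
            = (i0 :: t).map (fun (j : Nat) => (j : Int)) from rfl]
      rw [show ((i0 :: t).map (fun (j : Nat) => (j : Int)) ++ [((strings.length : Nat) : Int)])
            = ((i0 :: t) ++ [strings.length]).map (fun (j : Nat) => (j : Int)) from by simp]
      have h1 : PySem.List.pyGetD ((i0 :: t).map (fun (j : Nat) => (j : Int))) (k : Int) 0
          = (((i0 :: t).getD k 0 : Nat) : Int) := by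
        rw [PySem.List.pyGetD_natCast]
        exact pv_getD_map_cast (i0 :: t) k (by simpa using hk')
      have hcast1 : ((k : Int) + 1) = ((k + 1 : Nat) : Int) := by push_cast; ring
      have h2 : PySem.List.pyGetD (((i0 :: t) ++ [strings.length]).map (fun (j : Nat) => (j : Int)))
            ((k : Int) + 1) 0
          = ((((i0 :: t) ++ [strings.length]).getD (k + 1) 0 : Nat) : Int) := by
        rw [hcast1, PySem.List.pyGetD_natCast]
        exact pv_getD_map_cast _ (k + 1) (by simp; omega)
      rw [h1, h2, PySem.List.slice_natCast]
      simp [pvPrev, pvSliceN]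

-- ===== VERDICT (by name: the statement is the Claim_ definition above) =====
theorem create_sublists_spec : Claim_equal_create_sublists := by
  intro strings _
  unfold Spec_create_sublists
  rw [pv_A_eq_common, pv_B_eq_common]
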